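-- pv_equiv track=rewrite | github.com/ArchPrak/capstone | src/RestoreModel.py | decode_vars
-- ===== SOURCE A (Python) =====
-- def decode_vars(out, inp):
--   """ Function to map variables back acc. to input """
--   d = dict()
--   op = {'-':' -> ','^':'^','|':'v','~':'~'}
--   alpha = [a for a in inp if a.isalpha()]
--   j = 0
--   l = list()
--
--   for ch in out:
--
--     if ch.isalpha(): # mapping back operand alphabets
--       if ch not in d:
--         d[ch] = alpha[j]
--         j += 1
--       ch = d[ch]
--
--     elif ch in op:
--       ch = op[ch]
--
--     l.append(ch)
--
--   return " ".join(l)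
-- ===== SOURCE B (Python) =====
-- def decode_vars(out, inp):
--   """ Stateless re-decomposition: each variable char's replacement is computed
--   independently from its first-occurrence rank (the number of distinct
--   alphabetic chars before its first occurrence in out); no translation dict,
--   seen-list or counter is maintained across the scan. """
--   op = {'-': ' -> ', '^': '^', '|': 'v', '~': '~'}
--   alpha = [a for a in inp if a.isalpha()]
--   def name(ch):
--     rank = len({c for c in out[:out.index(ch)] if c.isalpha()})
--     return alpha[rank]
--   return " ".join(name(ch) if ch.isalpha() else op.get(ch, ch) for ch in out)
-- ===== Notes on version B (the rewrite author's own statement) =====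
-- stated objective: alternative
-- what changed: B maintains no state at all: instead of A's incrementally-built dict plus counter, each variable char's replacement is computed independently as alpha[rank] where rank is the number of distinct alphabetic chars in out before that char's first occurrence (out.index + a set over the prefix).
-- outside the precondition, e.g. on decode_vars('a b', 'x'): A raises IndexError, B raises IndexError
import Mathlib
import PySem

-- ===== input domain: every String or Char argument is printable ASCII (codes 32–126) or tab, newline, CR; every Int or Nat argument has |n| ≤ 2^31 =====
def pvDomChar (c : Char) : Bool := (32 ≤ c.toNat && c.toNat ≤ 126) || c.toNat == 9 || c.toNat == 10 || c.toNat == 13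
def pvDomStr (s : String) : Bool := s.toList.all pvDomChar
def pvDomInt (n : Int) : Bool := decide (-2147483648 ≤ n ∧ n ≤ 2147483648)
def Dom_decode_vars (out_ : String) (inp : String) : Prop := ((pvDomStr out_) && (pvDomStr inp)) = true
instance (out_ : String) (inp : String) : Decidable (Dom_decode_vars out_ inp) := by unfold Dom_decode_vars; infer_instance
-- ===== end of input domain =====

-- B is stateless: each variable char's replacement is alpha[rank], rank computed per char from
-- its first occurrence in out, instead of A's dict + counter built incrementally during the scan;
-- objective: alternative decomposition, no speed claim.

-- the operator table both Pythons literally define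
def pvOp : PySem.Dict Char String := PySem.Dict.ofList [('-', " -> "), ('^', "^"), ('|', "v"), ('~', "~")]

-- ===== PORT A =====
-- A's loop body: state = (d, j, l); `d[ch] = alpha[j]` is pyGetD (in range under Pre_),
-- the `ch = d[ch]` / `ch = op[ch]` lookups are getD with a default the guard makes unreachable.
def pvStepA (alpha : List Char) (st : PySem.Dict Char String × Int × List String) (ch : Char) :
    PySem.Dict Char String × Int × List String :=
  if PySem.Chars.isalpha ch then
    let dj :=
      if !(st.1.contains ch) then
        (st.1.insert ch (String.ofList [PySem.List.pyGetD alpha st.2.1 ch]), st.2.1 + 1)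
      else (st.1, st.2.1)
    (dj.1, dj.2, st.2.2 ++ [dj.1.getD ch (String.ofList [ch])])
  else if pvOp.contains ch then
    (st.1, st.2.1, st.2.2 ++ [pvOp.getD ch (String.ofList [ch])])
  else
    (st.1, st.2.1, st.2.2 ++ [String.ofList [ch]])

def decode_vars (out_ : String) (inp : String) : String :=
  let alpha : List Char := inp.toList.filter PySem.Chars.isalpha
  PySem.Str.join " " (out_.toList.foldl (pvStepA alpha) (PySem.Dict.empty, 0, [])).2.2

-- ===== PORT B =====
-- `len({c for c in out[:out.index(ch)] if c.isalpha()})`: out.index(ch) is idxOf (ch is a char of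
-- out, so it is present and index() cannot raise); out[:i] with i = idxOf ≥ 0 is take, exact.
def pvRankB (outs : List Char) (ch : Char) : Nat :=
  (PySem.Set.ofList ((outs.take (outs.idxOf ch)).filter PySem.Chars.isalpha)).length

-- `alpha[rank]` as pyGetD (in range under Pre_)
def pvNameB (outs alpha : List Char) (ch : Char) : String :=
  String.ofList [PySem.List.pyGetD alpha ((pvRankB outs ch : Nat) : Int) ch]

def decode_vars_alt (out_ : String) (inp : String) : String :=
  let alpha : List Char := inp.toList.filter PySem.Chars.isalpha
  PySem.Str.join " "
    (out_.toList.map (fun ch =>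
      if PySem.Chars.isalpha ch then pvNameB out_.toList alpha ch
      else pvOp.getD ch (String.ofList [ch])))

-- ===== PRECONDITION & SPEC =====
-- Pre_ excludes exactly the inputs where `alpha[...]` raises IndexError in Python A (out has more
-- distinct alphabetic chars than inp has alphabetic chars); Python B raises the same IndexError there.
def Pre_decode_vars (out_ : String) (inp : String) : Prop :=
  (PySem.List.dedup (out_.toList.filter PySem.Chars.isalpha)).length
    ≤ (inp.toList.filter PySem.Chars.isalpha).length
instance (out_ : String) (inp : String) : Decidable (Pre_decode_vars out_ inp) := by
  unfold Pre_decode_vars; infer_instance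

def pvWitness_decode_vars : String × String := ("a ^ b", "x | y")

def Spec_decode_vars (out_ : String) (inp : String) (out : String) : Prop := out = decode_vars_alt out_ inp
instance (out_ : String) (inp : String) (out : String) : Decidable (Spec_decode_vars out_ inp out) := by unfold Spec_decode_vars; infer_instance

-- ===== CLAIM (what is proved, stated in full; the proofs are below) =====
def Claim_equal_decode_vars : Prop := ∀ (out_ : String) (inp : String), Dom_decode_vars out_ inp → Pre_decode_vars out_ inp → Spec_decode_vars out_ inp (decode_vars out_ inp)

-- ===== LEMMAS AND PROOFS =====

-- proof-only intermediate form: the table A builds, characterised as a whole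
def pvSeenStep (s : List Char) (ch : Char) : List Char :=
  if PySem.Chars.isalpha ch && !(s.contains ch) then s ++ [ch] else s

def pvMkD (seen alpha : List Char) : PySem.Dict Char String :=
  (PySem.List.enumerate seen 0).foldl
    (fun d ic => d.insert ic.2 (String.ofList [PySem.List.pyGetD alpha ic.1 ic.2])) PySem.Dict.empty

def pvMapT (d : PySem.Dict Char String) (ch : Char) : String :=
  if PySem.Chars.isalpha ch then d.getD ch (String.ofList [ch])
  else pvOp.getD ch (String.ofList [ch])

lemma nodup_snoc {s : List Char} {x : Char} (hs : s.Nodup) (hx : x ∉ s) : (s ++ [x]).Nodup := by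
  rw [List.nodup_append]
  refine ⟨hs, List.nodup_singleton x, ?_⟩
  intro a ha b hb
  rw [List.mem_singleton] at hb
  subst hb
  exact fun h => hx (h ▸ ha)

lemma pvSeenStep_eq (s : List Char) (ch : Char) :
    pvSeenStep s ch = if PySem.Chars.isalpha ch then PySem.Set.add s ch else s := by
  cases h : PySem.Chars.isalpha ch
  · simp [pvSeenStep, h]
  · by_cases h2 : ch ∈ s
    · simp [pvSeenStep, PySem.Set.add, h, h2]
    · simp [pvSeenStep, PySem.Set.add, h, h2]

lemma scan_eq_filter (cs : List Char) : ∀ (s : List Char),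
    cs.foldl pvSeenStep s = (cs.filter PySem.Chars.isalpha).foldl PySem.Set.add s := by
  induction cs with
  | nil => intro s; rfl
  | cons ch rest ih =>
      intro s
      by_cases h : PySem.Chars.isalpha ch = true
      · simp [List.foldl_cons, pvSeenStep_eq, h, ih]
      · simp [List.foldl_cons, pvSeenStep_eq, h, ih]

lemma add_of_mem (s : List Char) (x : Char) (hx : x ∈ s) : PySem.Set.add s x = s := by
  simp [PySem.Set.add, hx]

lemma add_of_not_mem (s : List Char) (x : Char) (hx : x ∉ s) : PySem.Set.add s x = s ++ [x] := by
  simp [PySem.Set.add, hx]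

lemma addFold_struct (xs : List Char) : ∀ (s : List Char),
    ∃ t, xs.foldl PySem.Set.add s = s ++ t ∧ ∀ c ∈ t, c ∉ s := by
  induction xs with
  | nil => intro s; exact ⟨[], by simp⟩
  | cons x rest ih =>
      intro s
      by_cases hx : x ∈ s
      · obtain ⟨t, ht, hf⟩ := ih s
        exact ⟨t, by simpa [List.foldl_cons, add_of_mem s x hx] using ht, hf⟩
      · obtain ⟨t, ht, hf⟩ := ih (s ++ [x])
        refine ⟨x :: t, by simpa [List.foldl_cons, add_of_not_mem s x hx] using ht, ?_⟩
        intro c hc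
        rw [List.mem_cons] at hc
        rcases hc with rfl | hc
        · exact hx
        · have := hf c hc; intro hcs; exact this (by simp [hcs])

lemma addFold_nodup (xs : List Char) : ∀ (s : List Char), s.Nodup →
    (xs.foldl PySem.Set.add s).Nodup := by
  induction xs with
  | nil => intro s h; exact h
  | cons x rest ih =>
      intro s hs
      by_cases hx : x ∈ s
      · simpa [List.foldl_cons, add_of_mem s x hx] using ih s hs
      · have h1 : (x :: rest).foldl PySem.Set.add s = rest.foldl PySem.Set.add (s ++ [x]) := by
          simp [List.foldl_cons, add_of_not_mem s x hx]
        rw [h1]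
        exact ih _ (nodup_snoc hs hx)

lemma scan_nodup (cs : List Char) (s : List Char) (hs : s.Nodup) :
    (cs.foldl pvSeenStep s).Nodup := by
  rw [scan_eq_filter]
  exact addFold_nodup _ s hs

lemma pvMkD_snoc (s : List Char) (k : Char) (alpha : List Char) :
    pvMkD (s ++ [k]) alpha
      = (pvMkD s alpha).insert k (String.ofList [PySem.List.pyGetD alpha (s.length : Int) k]) := by
  simp [pvMkD, PySem.List.enumerate_append, PySem.List.enumerate]

lemma get?_pvMkD (alpha : List Char) (s : List Char) (hs : s.Nodup) (c : Char) :
    (pvMkD s alpha).get? c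
      = if c ∈ s then some (String.ofList [PySem.List.pyGetD alpha ((List.idxOf c s : Nat) : Int) c])
        else none := by
  induction s using List.reverseRecOn with
  | nil => simp [pvMkD, PySem.List.enumerate]
  | append_singleton s k ih =>
      have hs' : s.Nodup := (List.nodup_append.mp hs).1
      have hk : k ∉ s := fun hmem => (List.nodup_append.mp hs).2.2 k hmem k (by simp) rfl
      rw [pvMkD_snoc, PySem.Dict.get?_insert, ih hs']
      by_cases hck : c = k
      · subst hck
        have hidx : List.idxOf c (s ++ [c]) = s.length := by
          rw [List.idxOf_append]; simp [hk]
        simp [hk, hidx]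
      · by_cases hcs : c ∈ s
        · have hidx : List.idxOf c (s ++ [k]) = List.idxOf c s := by
            rw [List.idxOf_append]; simp [hcs]
          simp [hck, hcs, hidx]
        · simp [hck, hcs]

lemma contains_pvMkD (alpha : List Char) (s : List Char) (hs : s.Nodup) (c : Char) :
    (pvMkD s alpha).contains c = decide (c ∈ s) := by
  have h := get?_pvMkD alpha s hs c
  by_cases hc : c ∈ s
  · rw [if_pos hc] at h
    simp only [hc, decide_true]
    cases hcon : (pvMkD s alpha).contains c
    · rw [(PySem.Dict.get?_eq_none_iff_contains _ _).mpr hcon] at h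
      exact absurd h (by simp)
    · rfl
  · rw [if_neg hc] at h
    simp only [hc, decide_false]
    exact (PySem.Dict.get?_eq_none_iff_contains _ _).mp h

lemma getD_scan_mem (alpha : List Char) (s : List Char) (rest : List Char) (ch : Char) (d : String)
    (hs : s.Nodup) (hm : ch ∈ s) :
    (pvMkD (rest.foldl pvSeenStep s) alpha).getD ch d = (pvMkD s alpha).getD ch d := by
  obtain ⟨t, ht, hf⟩ := addFold_struct (rest.filter PySem.Chars.isalpha) s
  have hS : rest.foldl pvSeenStep s = s ++ t := by rw [scan_eq_filter]; exact ht
  have hSn : (s ++ t).Nodup := by rw [← hS]; exact scan_nodup rest s hs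
  have hidx : List.idxOf ch (s ++ t) = List.idxOf ch s := by
    rw [List.idxOf_append]; simp [hm]
  unfold PySem.Dict.getD
  rw [hS, get?_pvMkD alpha _ hSn ch, get?_pvMkD alpha s hs ch]
  simp [hm, hidx]

-- the main invariant: A's fold, started from the table for the chars seen so far,
-- appends exactly the table-translated remainder
lemma mainA (alpha : List Char) (cs : List Char) : ∀ (s : List Char) (l : List String),
    s.Nodup → (cs.foldl pvSeenStep s).length ≤ alpha.length →
    cs.foldl (pvStepA alpha) (pvMkD s alpha, (s.length : Int), l)
      = (pvMkD (cs.foldl pvSeenStep s) alpha, ((cs.foldl pvSeenStep s).length : Int),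
         l ++ cs.map (pvMapT (pvMkD (cs.foldl pvSeenStep s) alpha))) := by
  induction cs with
  | nil => intro s l _ _; simp
  | cons ch rest ih =>
      intro s l hs hlen
      by_cases ha : PySem.Chars.isalpha ch = true
      · by_cases hm : ch ∈ s
        · have hss : pvSeenStep s ch = s := by
            rw [pvSeenStep_eq, if_pos ha, add_of_mem s ch hm]
          have hcont : (pvMkD s alpha).contains ch = true := by
            rw [contains_pvMkD alpha s hs]; simp [hm]
          have hstep : pvStepA alpha (pvMkD s alpha, (s.length : Int), l) ch
              = (pvMkD s alpha, (s.length : Int),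
                 l ++ [(pvMkD s alpha).getD ch (String.ofList [ch])]) := by
            simp [pvStepA, ha, hcont]
          simp only [List.foldl_cons, hss] at hlen ⊢
          rw [hstep, ih s _ hs hlen]
          have hv : (pvMkD s alpha).getD ch (String.ofList [ch])
              = pvMapT (pvMkD (rest.foldl pvSeenStep s) alpha) ch := by
            unfold pvMapT
            rw [if_pos ha, getD_scan_mem alpha s rest ch _ hs hm]
          rw [hv]
          simp
        · have hss : pvSeenStep s ch = s ++ [ch] := by
            rw [pvSeenStep_eq, if_pos ha, add_of_not_mem s ch hm]
          have hcont : (pvMkD s alpha).contains ch = false := by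
            rw [contains_pvMkD alpha s hs]; simp [hm]
          have hnd' : (s ++ [ch]).Nodup := nodup_snoc hs hm
          have hins : (pvMkD s alpha).insert ch
                (String.ofList [PySem.List.pyGetD alpha (s.length : Int) ch])
              = pvMkD (s ++ [ch]) alpha := (pvMkD_snoc s ch alpha).symm
          have hidx : List.idxOf ch (s ++ [ch]) = s.length := by
            rw [List.idxOf_append]; simp [hm]
          have hv2 : (pvMkD (s ++ [ch]) alpha).getD ch (String.ofList [ch])
              = String.ofList [PySem.List.pyGetD alpha (s.length : Int) ch] := by
            unfold PySem.Dict.getD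
            rw [get?_pvMkD alpha _ hnd' ch]
            simp [hidx]
          have hstep : pvStepA alpha (pvMkD s alpha, (s.length : Int), l) ch
              = (pvMkD (s ++ [ch]) alpha, ((s.length : Int) + 1),
                 l ++ [String.ofList [PySem.List.pyGetD alpha (s.length : Int) ch]]) := by
            simp [pvStepA, ha, hcont]
            rw [← hins]
            simp
          simp only [List.foldl_cons, hss] at hlen ⊢
          rw [hstep,
              show ((s.length : Int) + 1) = (((s ++ [ch]).length : Nat) : Int) by simp,
              ih (s ++ [ch]) _ hnd' hlen]
          have hv : String.ofList [PySem.List.pyGetD alpha (s.length : Int) ch]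
              = pvMapT (pvMkD (rest.foldl pvSeenStep (s ++ [ch])) alpha) ch := by
            unfold pvMapT
            rw [if_pos ha, getD_scan_mem alpha (s ++ [ch]) rest ch _ hnd' (by simp), hv2]
          rw [hv]
          simp
      · have hss : pvSeenStep s ch = s := by
          rw [pvSeenStep_eq, if_neg ha]
        have hstep : pvStepA alpha (pvMkD s alpha, (s.length : Int), l) ch
            = (pvMkD s alpha, (s.length : Int),
               l ++ [pvOp.getD ch (String.ofList [ch])]) := by
          by_cases hop : pvOp.contains ch = true
          · simp [pvStepA, ha, hop]
          · have hd : pvOp.getD ch (String.ofList [ch]) = String.ofList [ch] := by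
              unfold PySem.Dict.getD
              rw [(PySem.Dict.get?_eq_none_iff_contains _ _).mpr (by simpa using hop)]
              rfl
            simp [pvStepA, ha, hop, hd]
        simp only [List.foldl_cons, hss] at hlen ⊢
        rw [hstep, ih s _ hs hlen]
        have hv : pvOp.getD ch (String.ofList [ch])
            = pvMapT (pvMkD (rest.foldl pvSeenStep s) alpha) ch := by
          unfold pvMapT
          rw [if_neg ha]
        rw [hv]
        simp

lemma scan_len (out_ : String) (inp : String) (h : Pre_decode_vars out_ inp) :
    (out_.toList.foldl pvSeenStep []).length ≤ (inp.toList.filter PySem.Chars.isalpha).length := by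
  rw [scan_eq_filter]
  simpa [PySem.List.dedup, PySem.Set.ofList, PySem.Set.empty] using h

-- filtering commutes with taking the prefix before the first occurrence (p c = true)
lemma filter_take_idxOf (p : Char → Bool) (c : Char) (hp : p c = true) : ∀ (l : List Char),
    (l.take (l.idxOf c)).filter p = (l.filter p).take ((l.filter p).idxOf c) := by
  intro l
  induction l with
  | nil => simp
  | cons a t ih =>
      by_cases hac : a = c
      · subst hac
        simp [List.idxOf_cons_self, hp]
      · have hne : (a == c) = false := by simpa using hac
        rw [List.idxOf_cons]
        simp only [hne, cond_false]
        by_cases hpa : p a = true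
        · have h1 : (a :: t).filter p = a :: t.filter p := by simp [hpa]
          rw [h1, List.idxOf_cons]
          simp only [hne, cond_false]
          simp [hpa, ih]
        · have h1 : (a :: t).filter p = t.filter p := by
            simp [List.filter_cons, hpa]
          rw [h1]
          simp [hpa, ih]

-- position in the dedup = number of distinct elements strictly before the first occurrence
lemma idxOf_addFold (c : Char) (xs : List Char) : ∀ (s : List Char), c ∉ s →
    List.idxOf c (xs.foldl PySem.Set.add s) = ((xs.take (xs.idxOf c)).foldl PySem.Set.add s).length := by
  induction xs with
  | nil =>
      intro s hc
      simpa using List.idxOf_eq_length_iff.mpr hc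
  | cons x t ih =>
      intro s hc
      by_cases hxc : x = c
      · subst hxc
        obtain ⟨u, hu, _⟩ := addFold_struct t (s ++ [x])
        have h1 : (x :: t).foldl PySem.Set.add s = (s ++ [x]) ++ u := by
          simpa [List.foldl_cons, add_of_not_mem s x hc] using hu
        rw [h1, List.idxOf_cons_self]
        have : List.idxOf x (s ++ [x] ++ u) = s.length := by
          rw [List.append_assoc, List.idxOf_append]
          simp [hc, List.idxOf_cons_self]
        simpa [List.idxOf_cons_self] using this
      · have hne : (x == c) = false := by simpa using hxc
        have hc' : c ∉ PySem.Set.add s x := by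
          intro hmem
          by_cases hx : x ∈ s
          · rw [add_of_mem s x hx] at hmem; exact hc hmem
          · rw [add_of_not_mem s x hx] at hmem
            rcases List.mem_append.mp hmem with h | h
            · exact hc h
            · exact hxc (List.mem_singleton.mp h).symm
        rw [List.foldl_cons, ih (PySem.Set.add s x) hc', List.idxOf_cons]
        simp only [hne, cond_false]
        simp [List.foldl_cons]

-- on chars of out, the table lookup equals B's stateless rank computation
lemma table_eq_rank (outs alpha : List Char) (ch : Char)
    (hmem : ch ∈ outs) (ha : PySem.Chars.isalpha ch = true) :
    (pvMkD (outs.foldl pvSeenStep []) alpha).getD ch (String.ofList [ch]) = pvNameB outs alpha ch := by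
  set xs := outs.filter PySem.Chars.isalpha with hxs
  have hchxs : ch ∈ xs := List.mem_filter.mpr ⟨hmem, ha⟩
  have hseen : outs.foldl pvSeenStep [] = xs.foldl PySem.Set.add [] := scan_eq_filter outs []
  have hnd : (outs.foldl pvSeenStep []).Nodup := scan_nodup outs [] List.nodup_nil
  have hchseen : ch ∈ outs.foldl pvSeenStep [] := by
    rw [hseen]
    have : ch ∈ PySem.Set.ofList xs := (PySem.Set.mem_ofList xs ch).mpr hchxs
    simpa [PySem.Set.ofList_eq_foldl] using this
  have hidx : List.idxOf ch (outs.foldl pvSeenStep []) = pvRankB outs ch := by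
    rw [hseen, idxOf_addFold ch xs [] (by simp)]
    unfold pvRankB
    rw [filter_take_idxOf PySem.Chars.isalpha ch ha outs, ← hxs]
    simp [PySem.Set.ofList_eq_foldl]
  unfold PySem.Dict.getD
  rw [get?_pvMkD alpha _ hnd ch, if_pos hchseen, hidx]
  rfl

-- ===== VERDICT (by name: the statement is the Claim_ definition above) =====
theorem decode_vars_spec : Claim_equal_decode_vars := by
  intro out_ inp _ hpre
  unfold Spec_decode_vars decode_vars decode_vars_alt
  have h1 := mainA (inp.toList.filter PySem.Chars.isalpha) out_.toList [] []
    List.nodup_nil (scan_len out_ inp hpre)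
  simp only [List.length_nil, Nat.cast_zero] at h1
  have h0 : (PySem.Dict.empty : PySem.Dict Char String)
      = pvMkD [] (inp.toList.filter PySem.Chars.isalpha) := rfl
  rw [← h0] at h1
  simp only [h1, List.nil_append]
  congr 1
  apply List.map_congr_left
  intro ch hch
  unfold pvMapT
  by_cases ha : PySem.Chars.isalpha ch = true
  · rw [if_pos ha, if_pos ha]
    exact table_eq_rank out_.toList (inp.toList.filter PySem.Chars.isalpha) ch hch ha
  · rw [if_neg ha, if_neg ha]
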